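-- pv_equiv track=rewrite | github.com/Jyvay/SIMpat | func.py | DirectProduct_Ordered
-- ===== SOURCE A (Python) =====
-- import itertools as iters
-- from operator import itemgetter
--
-- def DirectProduct_Ordered(
--     List1: list, List2: list
-- ):  # Direct product between two sets, intended for nodes
--     list_of_pairs = list(iters.product(List1, List2))
--     list_of_pairs = list(dict.fromkeys(list_of_pairs))
--     list_of_pairs = [sorted(list(pairs)) for pairs in list_of_pairs]
--     output = sorted(list_of_pairs, key=itemgetter(0))
--     return output
-- ===== SOURCE B (Python) =====
-- def DirectProduct_Ordered(List1, List2):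
--     # Dedup the raw product as A does, then order internally-sorted pairs by
--     # bucketing on the smaller element and walking the bucket keys in sorted
--     # order, instead of a comparison sort of the whole pair list.
--     pairs = dict.fromkeys((a, b) for a in List1 for b in List2)
--     buckets = {}
--     for a, b in pairs:
--         lo, hi = (a, b) if a <= b else (b, a)
--         buckets.setdefault(lo, []).append([lo, hi])
--     output = []
--     for k in sorted(buckets):
--         output += buckets[k]
--     return output
-- ===== Notes on version B (the rewrite author's own statement) =====
-- stated objective: alternative
-- what changed: The final comparison sort keyed on the pair's first element is replaced by grouping the internally-sorted pairs into buckets keyed by their smaller element and concatenating the buckets in sorted key order (stability via insertion order inside each bucket).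
import Mathlib
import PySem

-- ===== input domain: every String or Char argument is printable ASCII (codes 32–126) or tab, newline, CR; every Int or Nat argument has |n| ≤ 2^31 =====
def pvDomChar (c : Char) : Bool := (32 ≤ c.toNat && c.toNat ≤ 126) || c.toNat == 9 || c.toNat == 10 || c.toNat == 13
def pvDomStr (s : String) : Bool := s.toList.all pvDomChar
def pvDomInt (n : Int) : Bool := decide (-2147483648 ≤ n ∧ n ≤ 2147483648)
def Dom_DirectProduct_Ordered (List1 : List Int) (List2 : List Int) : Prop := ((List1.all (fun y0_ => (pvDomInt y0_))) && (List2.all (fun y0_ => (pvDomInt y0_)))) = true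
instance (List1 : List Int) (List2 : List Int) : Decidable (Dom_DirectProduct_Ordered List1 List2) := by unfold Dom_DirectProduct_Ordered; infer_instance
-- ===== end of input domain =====

-- B replaces A's final comparison sort (key = first element) by bucketing the
-- internally-sorted pairs on their smaller element and concatenating the
-- buckets in sorted key order (objective: alternative decomposition).

-- ===== PORT A =====
def DirectProduct_Ordered (List1 : List Int) (List2 : List Int) : List (List Int) :=
  -- list(itertools.product(List1, List2))
  let list_of_pairs := List1.flatMap (fun a => List2.map (fun b => (a, b)))
  -- list(dict.fromkeys(...))
  let list_of_pairs := PySem.List.dedup list_of_pairs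
  -- [sorted(list(pairs)) for pairs in ...]
  let list_of_pairs := list_of_pairs.map (fun p => PySem.List.sorted [p.1, p.2] (fun x => x) false)
  -- sorted(..., key=itemgetter(0)); every element is a 2-list, so item 0 is the head
  PySem.List.sorted list_of_pairs (fun l => l.headD 0) false

-- ===== PORT B =====
def DirectProduct_Ordered_alt (List1 : List Int) (List2 : List Int) : List (List Int) :=
  -- pairs = dict.fromkeys((a, b) for a in List1 for b in List2)
  let pairs := PySem.List.dedup (List1.flatMap (fun a => List2.map (fun b => (a, b))))
  -- bucket loop: buckets.setdefault(lo, []).append([lo, hi])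
  let buckets := pairs.foldl (fun d p =>
      let lo := if p.1 ≤ p.2 then p.1 else p.2
      let hi := if p.1 ≤ p.2 then p.2 else p.1
      d.modify lo [] (fun b => b ++ [[lo, hi]])) (PySem.Dict.empty)
  -- for k in sorted(buckets): output += buckets[k]
  (PySem.List.sorted buckets.keys (fun k => k) false).foldl
    (fun out k => out ++ buckets.getD k []) []

-- ===== PRECONDITION & SPEC =====
def Spec_DirectProduct_Ordered (List1 : List Int) (List2 : List Int) (out : List (List Int)) : Prop := out = DirectProduct_Ordered_alt List1 List2
instance (List1 : List Int) (List2 : List Int) (out : List (List Int)) : Decidable (Spec_DirectProduct_Ordered List1 List2 out) := by unfold Spec_DirectProduct_Ordered; infer_instance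

-- ===== CLAIM (what is proved, stated in full; the proofs are below) =====
def Claim_equal_DirectProduct_Ordered : Prop := ∀ (List1 : List Int) (List2 : List Int), Dom_DirectProduct_Ordered List1 List2 → Spec_DirectProduct_Ordered List1 List2 (DirectProduct_Ordered List1 List2)

-- ===== LEMMAS AND PROOFS =====

-- proof-only abbreviations: the smaller element of a pair, and the pair sorted
def pvMin (p : Int × Int) : Int := if p.1 ≤ p.2 then p.1 else p.2
def pvPairSort (p : Int × Int) : List Int := if p.1 ≤ p.2 then [p.1, p.2] else [p.2, p.1]

-- sorting a 2-element list
theorem sorted_pair (p : Int × Int) :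
    PySem.List.sorted [p.1, p.2] (fun x => x) false = pvPairSort p := by
  by_cases h : p.1 ≤ p.2
  · have hd : decide (p.2 < p.1) = false := by simp; omega
    simp [PySem.List.sorted, PySem.List.insertBy, List.foldl, pvPairSort, hd, h]
  · have hd : decide (p.2 < p.1) = true := by simp; omega
    simp [PySem.List.sorted, PySem.List.insertBy, List.foldl, pvPairSort, hd, h]

theorem headD_pvPairSort (p : Int × Int) : (pvPairSort p).headD 0 = pvMin p := by
  simp only [pvPairSort, pvMin]; split_ifs <;> rfl

-- insertBy walks past a prefix it does not insert into
theorem insertBy_prepend {α : Type} (before : α → α → Bool) (x : α) (l rest : List α)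
    (h : ∀ y ∈ l, before x y = false) :
    PySem.List.insertBy before x (l ++ rest) = l ++ PySem.List.insertBy before x rest := by
  induction l with
  | nil => rfl
  | cons y t ih =>
    simp only [List.cons_append, PySem.List.insertBy, h y (by simp)]
    simp only [Bool.false_eq_true, if_false, List.cons.injEq, true_and]
    exact ih (fun z hz => h z (by simp [hz]))

-- insertBy puts x in front when every element should come after it
theorem insertBy_front {α : Type} (before : α → α → Bool) (x : α) (l : List α)
    (h : ∀ y ∈ l, before x y = true) :
    PySem.List.insertBy before x l = x :: l := by
  cases l with
  | nil => rfl
  | cons y t => simp [PySem.List.insertBy, h y (by simp)]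

-- inserting into a key-bucketed concatenation appends x to the bucket of its key
theorem insertBy_flatMap {α : Type} (key : α → Int) (x : α) (S : List Int) (f : Int → List α)
    (hS : S.Pairwise (· < ·)) (hx : key x ∈ S) (hf : ∀ k ∈ S, ∀ y ∈ f k, key y = k) :
    PySem.List.insertBy (fun a b => decide (key a < key b)) x (S.flatMap f) =
      S.flatMap (fun k => f k ++ if key x == k then [x] else []) := by
  induction S with
  | nil => cases hx
  | cons k S' ih =>
    have hkS' : ∀ k' ∈ S', k < k' := (List.pairwise_cons.mp hS).1
    by_cases hk : key x = k
    · -- x lands right after the bucket of its own key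
      have h1 : ∀ y ∈ f k, (fun a b => decide (key a < key b)) x y = false := by
        intro y hy
        have hyk := hf k (by simp) y hy
        simp [hyk, hk]
      have h2 : ∀ y ∈ S'.flatMap f, (fun a b => decide (key a < key b)) x y = true := by
        intro y hy
        rcases List.mem_flatMap.mp hy with ⟨k', hk', hyk'⟩
        have hyk := hf k' (by simp [hk']) y hyk'
        simp only [hyk, hk, decide_eq_true_eq]
        exact hkS' k' hk'
      rw [List.flatMap_cons, insertBy_prepend _ _ _ _ h1, insertBy_front _ _ _ h2]
      have h3 : S'.flatMap (fun k' => f k' ++ if key x == k' then [x] else []) = S'.flatMap f := by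
        rw [List.flatMap, List.flatMap]
        congr 1
        apply List.map_congr_left
        intro k' hk'
        have hne : (key x == k') = false := by
          have := hkS' k' hk'
          simp only [beq_eq_false_iff_ne, ne_eq, hk]
          omega
        simp [hne]
      rw [List.flatMap_cons, h3]
      simp [hk]
    · -- key x belongs to a later bucket
      have hxS' : key x ∈ S' := by rcases List.mem_cons.mp hx with h | h; exact absurd h hk; exact h
      have hklt : k < key x := hkS' _ hxS'
      have h1 : ∀ y ∈ f k, (fun a b => decide (key a < key b)) x y = false := by
        intro y hy
        have hyk := hf k (by simp) y hy
        simp only [hyk, decide_eq_false_iff_not, not_lt]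
        omega
      rw [List.flatMap_cons, insertBy_prepend _ _ _ _ h1, List.flatMap_cons]
      have hne : (key x == k) = false := by simp [hk]
      rw [hne]
      simp only [Bool.false_eq_true, if_false, List.append_nil]
      congr 1
      exact ih (List.pairwise_cons.mp hS).2 hxS' (fun k' hk' => hf k' (by simp [hk']))

-- one right-extension step of the stable insertion sort
theorem sorted_append_singleton {α κ : Type} [LT κ] [DecidableLT κ] (xs : List α) (x : α) (key : α → κ) :
    PySem.List.sorted (xs ++ [x]) key false =
      PySem.List.insertBy (fun a b => decide (key a < key b)) x (PySem.List.sorted xs key false) := by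
  rw [PySem.List.sorted_eq_foldl_insertBy, PySem.List.sorted_eq_foldl_insertBy, List.foldl_append]
  rfl

-- the stable sort by an Int key is the concatenation of the key buckets in
-- strictly increasing key order
theorem sorted_eq_flatMap_buckets {α : Type} (key : α → Int) (xs : List α) (S : List Int)
    (hS : S.Pairwise (· < ·)) (hmem : ∀ x ∈ xs, key x ∈ S) :
    PySem.List.sorted xs key false = S.flatMap (fun k => xs.filter (fun x => key x == k)) := by
  induction xs using List.reverseRecOn with
  | nil => simp [PySem.List.sorted]
  | append_singleton t x ih =>
    rw [sorted_append_singleton, ih (fun y hy => hmem y (by simp [hy]))]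
    rw [insertBy_flatMap key x S _ hS (hmem x (by simp))
      (fun k _ y hy => by exact eq_of_beq (List.mem_filter.mp hy).2)]
    rw [List.flatMap, List.flatMap]
    congr 1
    apply List.map_congr_left
    intro k _
    rw [List.filter_append, List.filter_singleton]
    simp

-- the common core: for ANY pair list P, A's sort of the internally sorted
-- pairs equals B's bucket-and-concatenate pipeline on P
theorem core (P : List (Int × Int)) :
    PySem.List.sorted (P.map (fun p => PySem.List.sorted [p.1, p.2] (fun x => x) false))
      (fun l => l.headD 0) false =
    (PySem.List.sorted
        (P.foldl (fun d p =>
          let lo := if p.1 ≤ p.2 then p.1 else p.2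
          let hi := if p.1 ≤ p.2 then p.2 else p.1
          d.modify lo [] (fun b => b ++ [[lo, hi]])) (PySem.Dict.empty)).keys
        (fun k => k) false).foldl
      (fun out k =>
        out ++ (P.foldl (fun d p =>
          let lo := if p.1 ≤ p.2 then p.1 else p.2
          let hi := if p.1 ≤ p.2 then p.2 else p.1
          d.modify lo [] (fun b => b ++ [[lo, hi]])) (PySem.Dict.empty)).getD k []) [] := by
  -- B's fold is a fold over (key, value) pairs
  have hfold :
      P.foldl (fun d p =>
        let lo := if p.1 ≤ p.2 then p.1 else p.2
        let hi := if p.1 ≤ p.2 then p.2 else p.1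
        d.modify lo [] (fun b => b ++ [[lo, hi]])) (PySem.Dict.empty : PySem.Dict Int (List (List Int)))
      = (P.map (fun p => (pvMin p, pvPairSort p))).foldl
          (fun d q => d.modify q.1 [] (fun b => b ++ [q.2])) (PySem.Dict.empty) := by
    rw [List.foldl_map]
    apply PySem.List.foldl_congr_mem
    intro d p _
    by_cases h : p.1 ≤ p.2 <;> simp [pvMin, pvPairSort, h]
  rw [hfold]
  -- bucket contents
  have hgetD : ∀ k : Int,
      ((P.map (fun p => (pvMin p, pvPairSort p))).foldl
          (fun d q => d.modify q.1 [] (fun b => b ++ [q.2])) (PySem.Dict.empty)).getD k []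
        = (P.map pvPairSort).filter (fun l => l.headD 0 == k) := by
    intro k
    rw [PySem.Dict.getD_foldl_modify_append, PySem.Dict.getD_empty, List.nil_append]
    rw [List.filter_map, List.map_map, List.filter_map]
    have hfil : P.filter ((fun q : Int × List Int => q.1 == k) ∘ (fun p => (pvMin p, pvPairSort p)))
        = P.filter ((fun l : List Int => l.headD 0 == k) ∘ pvPairSort) := by
      apply List.filter_congr
      intro p _
      simp only [Function.comp]
      rw [headD_pvPairSort]
    rw [hfil]
    exact List.map_congr_left (fun p _ => rfl)
  -- bucket keys
  have hkeys :
      ((P.map (fun p => (pvMin p, pvPairSort p))).foldl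
          (fun d q => d.modify q.1 [] (fun b => b ++ [q.2])) (PySem.Dict.empty)).keys
        = PySem.Set.ofList (P.map pvMin) := by
    rw [PySem.Dict.keys_foldl_modify_key (P.map (fun p => (pvMin p, pvPairSort p)))
      (fun q => q.1) [] (fun _ q => fun b => b ++ [q.2]) PySem.Dict.empty]
    rw [PySem.Dict.keys_empty, List.map_map]
    rfl
  rw [hkeys]
  -- both sides as a flatMap of the buckets over the sorted distinct keys
  rw [PySem.List.foldl_append_eq_flatMap, List.nil_append]
  rw [List.map_congr_left (fun p _ => sorted_pair p)]
  rw [sorted_eq_flatMap_buckets (fun l => l.headD 0) (P.map pvPairSort)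
    (PySem.List.sorted (PySem.Set.ofList (P.map pvMin)) (fun k => k) false)
    (PySem.List.sorted_ofList_pairwise_lt _)
    (by
      intro l hl
      rcases List.mem_map.mp hl with ⟨p, hp, rfl⟩
      rw [PySem.List.mem_sorted, PySem.Set.mem_ofList]
      simp only [headD_pvPairSort]
      exact List.mem_map_of_mem hp)]
  rw [List.flatMap, List.flatMap]
  congr 1
  apply List.map_congr_left
  intro k _
  exact (hgetD k).symm

-- ===== VERDICT (by name: the statement is the Claim_ definition above) =====
theorem DirectProduct_Ordered_spec : Claim_equal_DirectProduct_Ordered := by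
  intro List1 List2 _
  unfold Spec_DirectProduct_Ordered DirectProduct_Ordered DirectProduct_Ordered_alt
  exact core (PySem.List.dedup (List1.flatMap (fun a => List2.map (fun b => (a, b)))))
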